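-- pv_equiv track=rewrite | github.com/novyne/Wordle-Solver | utils.py | old_get_feedback
-- ===== SOURCE A (Python) =====
-- _feedback_cache = {}
--
-- ord_dict = {c: i for i, c in enumerate("abcdefghijklmnopqrstuvwxyz")}
--
-- def old_get_feedback(guess: str, answer: str) -> int:
--     """
--     Optimized version of get_feedback using bitwise operations and integer encoding.
--     Returns a single integer representing feedback for the guess compared to the answer.
--     Each position uses 2 bits:
--     00 = grey (x), 01 = yellow (y), 10 = green (g).
--     The integer is constructed by shifting bits accordingly.
--
--     This version ensures the number of yellows and greens matches the answer's letter counts.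
--     """
--
--     cache_key = (guess, answer)
--     if cache_key in _feedback_cache:
--         return _feedback_cache[cache_key]
--
--     length = len(guess)
--     feedback_num = 0
--
--     guess_ords = tuple(ord_dict[c] for c in guess)
--     answer_ords = tuple(ord_dict[c] for c in answer)
--
--     # Use fixed-size arrays for letter counts (assuming ASCII lowercase letters)
--     answer_letter_counts = [0] * 26
--     for i in range(length):
--         answer_letter_counts[answer_ords[i]] += 1
--
--     feedback_digits = [0] * length
--
--     # First pass: mark greens and reduce counts
--     for i in range(length):
--         g_char = guess[i]
--         a_char = answer[i]
--         if g_char == a_char: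
--             feedback_digits[i] = 2  # green
--             answer_letter_counts[guess_ords[i]] -= 1
--
--     # Second pass: mark yellows if letter exists in answer counts
--     for i in range(length):
--         if feedback_digits[i] == 0:
--             idx = guess_ords[i]
--             if answer_letter_counts[idx] > 0:
--                 feedback_digits[i] = 1  # yellow
--                 answer_letter_counts[idx] -= 1
--
--     # Construct feedback number using bitwise shifts (2 bits per position)
--     for i in range(length):
--         feedback_num |= (feedback_digits[i] << (2 * i))
--
--     _feedback_cache[cache_key] = feedback_num
--
--     return feedback_num
-- ===== SOURCE B (Python) =====
-- _feedback_cache = {}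
--
-- def old_get_feedback(guess: str, answer: str) -> int:
--     """Wordle feedback, 2 bits per position (0 grey, 1 yellow, 2 green).
--
--     Instead of a 26-entry letter-count table, mark consumed answer positions
--     in a boolean 'used' array: greens consume their own position, yellows
--     consume the first still-unused answer position holding the letter.
--     """
--     cache_key = (guess, answer)
--     if cache_key in _feedback_cache:
--         return _feedback_cache[cache_key]
--
--     n = len(guess)
--     digits = [0] * n
--     used = [False] * n
--
--     for i in range(n):
--         if guess[i] == answer[i]:
--             digits[i] = 2
--             used[i] = True
--
--     for i in range(n):
--         if digits[i] == 0:
--             c = guess[i]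
--             for j in range(n):
--                 if not used[j] and answer[j] == c:
--                     used[j] = True
--                     digits[i] = 1
--                     break
--
--     feedback = 0
--     for i in range(n):
--         feedback |= digits[i] << (2 * i)
--
--     _feedback_cache[cache_key] = feedback
--     return feedback
-- ===== Notes on version B (the rewrite author's own statement) =====
-- stated objective: alternative
-- what changed: Replaces the 26-entry letter-count table (built, decremented by greens, consumed by yellows) with a boolean 'used' array over answer positions: greens mark their own position used, and each yellow linearly scans for the first unused answer position holding the letter.
import Mathlib
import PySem

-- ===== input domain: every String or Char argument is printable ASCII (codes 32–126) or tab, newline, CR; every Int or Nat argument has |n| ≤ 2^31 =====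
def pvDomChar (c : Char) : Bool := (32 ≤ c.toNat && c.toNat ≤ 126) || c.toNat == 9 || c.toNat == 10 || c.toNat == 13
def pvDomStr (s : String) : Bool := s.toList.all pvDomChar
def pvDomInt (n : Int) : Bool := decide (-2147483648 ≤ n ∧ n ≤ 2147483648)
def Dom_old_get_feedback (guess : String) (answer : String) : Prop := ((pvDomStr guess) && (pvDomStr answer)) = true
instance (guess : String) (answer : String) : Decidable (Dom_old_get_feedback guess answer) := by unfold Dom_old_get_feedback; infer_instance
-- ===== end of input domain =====

-- B replaces A's 26-entry letter-count table by a boolean 'used' array over answer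
-- positions (yellows consume the first unused matching position); same cost class,
-- objective: alternative. Return values only; the Python module cache is not modelled.

-- ===== PORT A =====

-- ord_dict[c]; exact for lowercase c, which Pre_ guarantees (Python raises KeyError otherwise)
def pvToIdx (c : Char) : Nat := c.toNat - 97

-- `for i in range(length): answer_letter_counts[answer_ords[i]] += 1`
def pvCountsA (aOrds : List Nat) (idxs : List Nat) : List Int :=
  idxs.foldl (fun cnt i =>
    cnt.set (aOrds.getD i 0) (cnt.getD (aOrds.getD i 0) 0 + 1)) (List.replicate 26 0)

-- first pass: greens, decrementing the letter counts
def pvGreenA (g a : List Char) (gOrds : List Nat) (idxs : List Nat)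
    (st0 : List Int × List Int) : List Int × List Int :=
  idxs.foldl (fun st i =>
    if g.getD i ' ' = a.getD i ' ' then
      (st.1.set i 2, st.2.set (gOrds.getD i 0) (st.2.getD (gOrds.getD i 0) 0 - 1))
    else st) st0

-- second pass: yellows while counts remain
def pvYellowA (gOrds : List Nat) (idxs : List Nat)
    (st0 : List Int × List Int) : List Int × List Int :=
  idxs.foldl (fun st i =>
    if st.1.getD i 0 = 0 then
      if st.2.getD (gOrds.getD i 0) 0 > 0 then
        (st.1.set i 1, st.2.set (gOrds.getD i 0) (st.2.getD (gOrds.getD i 0) 0 - 1))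
      else st
    else st) st0

-- `feedback_num |= digits[i] << (2*i)` (both Pythons pack identically)
def pvPack (digits : List Int) (idxs : List Nat) : Int :=
  idxs.foldl (fun acc i => Int.lor acc (digits.getD i 0 <<< (2 * i))) 0

def old_get_feedback (guess : String) (answer : String) : Int :=
  let g := guess.toList
  let a := answer.toList
  let length := g.length
  let guessOrds := g.map pvToIdx
  let answerOrds := a.map pvToIdx
  let counts := pvCountsA answerOrds (List.range length)
  let st1 := pvGreenA g a guessOrds (List.range length) (List.replicate length 0, counts)
  let st2 := pvYellowA guessOrds (List.range length) st1
  pvPack st2.1 (List.range length)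

-- ===== PORT B =====

-- greens: mark the position used
def pvGreenB (g a : List Char) (idxs : List Nat)
    (st0 : List Int × List Bool) : List Int × List Bool :=
  idxs.foldl (fun st i =>
    if g.getD i ' ' = a.getD i ' ' then (st.1.set i 2, st.2.set i true) else st) st0

-- yellows: scan for the first unused answer position holding the letter (the inner
-- `for j in range(n): … break` loop is ported as find? over the same index list)
def pvYellowB (g a : List Char) (scan : List Nat) (idxs : List Nat)
    (st0 : List Int × List Bool) : List Int × List Bool :=
  idxs.foldl (fun st i =>
    if st.1.getD i 0 = 0 then
      match scan.find? (fun j => !(st.2.getD j false) && (a.getD j ' ' == g.getD i ' ')) with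
      | some j => (st.1.set i 1, st.2.set j true)
      | none => st
    else st) st0

def old_get_feedback_alt (guess : String) (answer : String) : Int :=
  let g := guess.toList
  let a := answer.toList
  let n := g.length
  let st1 := pvGreenB g a (List.range n) (List.replicate n 0, List.replicate n false)
  let st2 := pvYellowB g a (List.range n) (List.range n) st1
  pvPack st2.1 (List.range n)

-- ===== PRECONDITION & SPEC =====

-- Exactly where the Python A returns: every character of both strings is a lowercase
-- ASCII letter (otherwise ord_dict raises KeyError) and the answer is at least as long
-- as the guess (otherwise answer_ords[i] / answer[i] raises IndexError).
-- c is a lowercase ASCII letter ('a' ≤ c ≤ 'z')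
def pvLower (c : Char) : Bool := 97 ≤ c.toNat && c.toNat ≤ 122

def Pre_old_get_feedback (guess : String) (answer : String) : Prop :=
  guess.toList.length ≤ answer.toList.length ∧
  guess.toList.all pvLower = true ∧ answer.toList.all pvLower = true
instance (guess : String) (answer : String) : Decidable (Pre_old_get_feedback guess answer) := by
  unfold Pre_old_get_feedback; infer_instance

def pvWitness_old_get_feedback : String × String := ("crane", "caner")

def Spec_old_get_feedback (guess : String) (answer : String) (out : Int) : Prop :=
  out = old_get_feedback_alt guess answer
instance (guess : String) (answer : String) (out : Int) : Decidable (Spec_old_get_feedback guess answer out) := by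
  unfold Spec_old_get_feedback; infer_instance

-- ===== CLAIM (what is proved, stated in full; the proofs are below) =====
def Claim_equal_old_get_feedback : Prop := ∀ (guess : String) (answer : String), Dom_old_get_feedback guess answer → Pre_old_get_feedback guess answer → Spec_old_get_feedback guess answer (old_get_feedback guess answer)

-- ===== LEMMAS AND PROOFS =====

lemma pv_getD_set_eq {α : Type} (l : List α) (i : Nat) (x d : α) (h : i < l.length) :
    (l.set i x).getD i d = x := by
  simp [List.getD_eq_getElem?_getD, h]

lemma pv_getD_set_ne {α : Type} (l : List α) (i j : Nat) (x d : α) (h : i ≠ j) :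
    (l.set i x).getD j d = l.getD j d := by
  simp [List.getD_eq_getElem?_getD, h]

lemma pv_getD_map (s : List Char) (i : Nat) (h : i < s.length) :
    (s.map pvToIdx).getD i 0 = pvToIdx (s.getD i ' ') := by
  simp [List.getD_eq_getElem?_getD, h]

lemma pv_getD_mem (s : List Char) (i : Nat) (h : i < s.length) : s.getD i ' ' ∈ s := by
  rw [List.getD_eq_getElem?_getD, List.getElem?_eq_getElem h]
  exact List.getElem_mem h

lemma pvToIdx_lt (c : Char) (h : 97 ≤ c.toNat ∧ c.toNat ≤ 122) : pvToIdx c < 26 := by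
  unfold pvToIdx; omega

lemma pvToIdx_inj (c c' : Char) (h : 97 ≤ c.toNat ∧ c.toNat ≤ 122)
    (h' : 97 ≤ c'.toNat ∧ c'.toNat ≤ 122) (he : pvToIdx c = pvToIdx c') : c = c' := by
  have : c.toNat = c'.toNat := by unfold pvToIdx at he; omega
  apply Char.ext; apply UInt32.ext; exact this

lemma pv_countP_split {α : Type} (l : List α) (p q : α → Bool) :
    l.countP p = l.countP (fun x => p x && q x) + l.countP (fun x => p x && !q x) := by
  induction l with
  | nil => simp
  | cons x t ih =>
    simp only [List.countP_cons]
    cases hp : p x <;> cases hq : q x <;> simp [hp, hq] <;> omega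

lemma pv_countP_drop {α : Type} (l : List α) (p q : α → Bool) (j : α) (hnd : l.Nodup)
    (hj : j ∈ l) (hpj : p j = true) (hqj : q j = false)
    (hpq : ∀ x ∈ l, x ≠ j → p x = q x) : l.countP q + 1 = l.countP p := by
  induction l with
  | nil => simp at hj
  | cons x t ih =>
    rcases List.mem_cons.mp hj with rfl | hjt
    · have hnt : j ∉ t := (List.nodup_cons.mp hnd).1
      have : t.countP p = t.countP q := by
        apply List.countP_congr
        intro y hy
        have := hpq y (List.mem_cons_of_mem _ hy) (fun e => hnt (e ▸ hy))
        simp [this]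
      simp [List.countP_cons, hpj, hqj, this]
    · have hxj : x ≠ j := fun e => (List.nodup_cons.mp hnd).1 (e ▸ hjt)
      have hx := hpq x (List.mem_cons_self) hxj
      have := ih (List.nodup_cons.mp hnd).2 hjt (fun y hy hne => hpq y (List.mem_cons_of_mem _ hy) hne)
      simp only [List.countP_cons, hx]
      omega

lemma pv_countsA_spec (aOrds : List Nat) (idxs : List Nat) (cnt : List Int)
    (hc : cnt.length = 26) (hb : ∀ i ∈ idxs, aOrds.getD i 0 < 26) :
    (idxs.foldl (fun cnt i =>
        cnt.set (aOrds.getD i 0) (cnt.getD (aOrds.getD i 0) 0 + 1)) cnt).length = 26 ∧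
    ∀ k, (idxs.foldl (fun cnt i =>
        cnt.set (aOrds.getD i 0) (cnt.getD (aOrds.getD i 0) 0 + 1)) cnt).getD k 0
      = cnt.getD k 0 + (idxs.countP (fun i => aOrds.getD i 0 == k) : ℤ) := by
  induction idxs generalizing cnt with
  | nil => simp [hc]
  | cons i t ih =>
    simp only [List.foldl_cons]
    have hlt : aOrds.getD i 0 < 26 := hb i List.mem_cons_self
    set cnt' := cnt.set (aOrds.getD i 0) (cnt.getD (aOrds.getD i 0) 0 + 1) with hcnt'
    have hc' : cnt'.length = 26 := by simp [hcnt', hc]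
    obtain ⟨hL, hK⟩ := ih cnt' hc' (fun j hj => hb j (List.mem_cons_of_mem _ hj))
    refine ⟨hL, fun k => ?_⟩
    rw [hK k]
    rw [List.countP_cons]
    by_cases hek : aOrds.getD i 0 = k
    · rw [hcnt', hek, pv_getD_set_eq _ _ _ _ (by omega), if_pos (beq_self_eq_true k)]
      push_cast; ring
    · rw [hcnt', pv_getD_set_ne _ _ _ _ _ hek, if_neg (by simp only [beq_iff_eq]; exact hek)]
      push_cast; ring

lemma pv_green_fst (g a : List Char) (gOrds : List Nat) (idxs : List Nat)
    (stA : List Int × List Int) (stB : List Int × List Bool) (h : stA.1 = stB.1) :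
    (pvGreenA g a gOrds idxs stA).1 = (pvGreenB g a idxs stB).1 := by
  unfold pvGreenA pvGreenB
  induction idxs generalizing stA stB with
  | nil => exact h
  | cons i t ih =>
    simp only [List.foldl_cons]
    by_cases hc : g.getD i ' ' = a.getD i ' '
    · rw [if_pos hc, if_pos hc]; exact ih _ _ (by simp [h])
    · rw [if_neg hc, if_neg hc]; exact ih _ _ h

lemma pv_greenB_used (g a : List Char) (idxs : List Nat) (st : List Int × List Bool)
    (hl : ∀ i ∈ idxs, i < st.2.length) :
    (pvGreenB g a idxs st).2.length = st.2.length ∧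
    ∀ j, (pvGreenB g a idxs st).2.getD j false
      = (st.2.getD j false || (decide (j ∈ idxs) && decide (g.getD j ' ' = a.getD j ' '))) := by
  unfold pvGreenB
  induction idxs generalizing st with
  | nil => simp
  | cons i t ih =>
    simp only [List.foldl_cons]
    set st' : List Int × List Bool := if g.getD i ' ' = a.getD i ' ' then (st.1.set i 2, st.2.set i true) else st with hst'
    have hlen' : st'.2.length = st.2.length := by
      rw [hst']; split <;> simp
    have hl' : ∀ x ∈ t, x < st'.2.length := fun x hx => hlen' ▸ hl x (List.mem_cons_of_mem _ hx)
    obtain ⟨hL, hK⟩ := ih st' hl'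
    refine ⟨by rw [hL, hlen'], fun j => ?_⟩
    rw [hK j]
    have hgd : st'.2.getD j false = (st.2.getD j false || (decide (j = i) && decide (g.getD i ' ' = a.getD i ' '))) := by
      rw [hst']
      by_cases hc : g.getD i ' ' = a.getD i ' '
      · simp only [if_pos hc]
        by_cases hji : j = i
        · subst hji
          rw [pv_getD_set_eq _ _ _ _ (hl j List.mem_cons_self), decide_eq_true hc,
            decide_eq_true (rfl : j = j)]
          simp
        · rw [pv_getD_set_ne _ _ _ _ _ (fun e => hji e.symm), decide_eq_false hji]
          simp
      · rw [if_neg hc, decide_eq_false hc]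
        simp
    rw [hgd]
    by_cases hji : j = i
    · subst hji
      apply Bool.eq_iff_iff.mpr
      simp [List.mem_cons]
      tauto
    · apply Bool.eq_iff_iff.mpr
      simp [List.mem_cons, hji]

lemma pv_greenA_cnt (g a : List Char) (gOrds : List Nat) (idxs : List Nat)
    (st : List Int × List Int) (hc : st.2.length = 26)
    (hb : ∀ i ∈ idxs, gOrds.getD i 0 < 26) :
    (pvGreenA g a gOrds idxs st).2.length = 26 ∧
    ∀ k, (pvGreenA g a gOrds idxs st).2.getD k 0
      = st.2.getD k 0 - (idxs.countP
          (fun i => decide (g.getD i ' ' = a.getD i ' ') && (gOrds.getD i 0 == k)) : ℤ) := by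
  unfold pvGreenA
  induction idxs generalizing st with
  | nil => simp [hc]
  | cons i t ih =>
    simp only [List.foldl_cons]
    set st' : List Int × List Int :=
      (if g.getD i ' ' = a.getD i ' ' then
        (st.1.set i 2, st.2.set (gOrds.getD i 0) (st.2.getD (gOrds.getD i 0) 0 - 1))
      else st) with hst'
    have hc' : st'.2.length = 26 := by rw [hst']; split <;> simp [hc]
    obtain ⟨hL, hK⟩ := ih st' hc' (fun x hx => hb x (List.mem_cons_of_mem _ hx))
    refine ⟨hL, fun k => ?_⟩
    rw [hK k, List.countP_cons]
    have hlt : gOrds.getD i 0 < 26 := hb i List.mem_cons_self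
    by_cases hm : g.getD i ' ' = a.getD i ' '
    · by_cases hek : gOrds.getD i 0 = k
      · rw [if_pos (by rw [decide_eq_true hm, beq_iff_eq.mpr hek]; rfl)]
        rw [hst', if_pos hm]
        show (st.2.set (gOrds.getD i 0) (st.2.getD (gOrds.getD i 0) 0 - 1)).getD k 0 - _ = _
        rw [← hek, pv_getD_set_eq _ _ _ _ (by omega)]
        push_cast; ring
      · rw [if_neg (by rw [decide_eq_true hm]; simp only [Bool.true_and, beq_iff_eq]; exact hek)]
        rw [hst', if_pos hm]
        show (st.2.set (gOrds.getD i 0) (st.2.getD (gOrds.getD i 0) 0 - 1)).getD k 0 - _ = _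
        rw [pv_getD_set_ne _ _ _ _ _ hek]
        push_cast; ring
    · rw [if_neg (by rw [decide_eq_false hm]; simp)]
      rw [hst', if_neg hm]
      push_cast; ring

lemma pv_yellow_eq (g a : List Char) (hlen : g.length ≤ a.length)
    (hg : ∀ c ∈ g, 97 ≤ c.toNat ∧ c.toNat ≤ 122)
    (ha : ∀ c ∈ a, 97 ≤ c.toNat ∧ c.toNat ≤ 122)
    (idxs : List Nat) (hi : ∀ i ∈ idxs, i < g.length)
    (dA cnt : List Int) (dB : List Int) (used : List Bool)
    (hd : dA = dB) (hc : cnt.length = 26) (hu : used.length = g.length)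
    (hinv : ∀ k, cnt.getD k 0 = ((List.range g.length).countP
        (fun j => (pvToIdx (a.getD j ' ') == k) && !(used.getD j false)) : ℤ)) :
    (pvYellowA (g.map pvToIdx) idxs (dA, cnt)).1
      = (pvYellowB g a (List.range g.length) idxs (dB, used)).1 := by
  unfold pvYellowA pvYellowB
  induction idxs generalizing dA cnt dB used with
  | nil => exact hd
  | cons i t ih =>
    subst hd
    simp only [List.foldl_cons]
    have hit : ∀ x ∈ t, x < g.length := fun x hx => hi x (List.mem_cons_of_mem _ hx)
    by_cases h0 : dA.getD i 0 = 0
    · rw [if_pos h0, if_pos h0]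
      have hin : i < g.length := hi i List.mem_cons_self
      have hk : (g.map pvToIdx).getD i 0 = pvToIdx (g.getD i ' ') := pv_getD_map g i hin
      have hglow := hg _ (pv_getD_mem g i hin)
      have hklt : (g.map pvToIdx).getD i 0 < 26 := by rw [hk]; exact pvToIdx_lt _ hglow
      have hpe : ∀ j ∈ List.range g.length,
          (!(used.getD j false) && (a.getD j ' ' == g.getD i ' '))
            = ((pvToIdx (a.getD j ' ') == (g.map pvToIdx).getD i 0) && !(used.getD j false)) := by
        intro j hj
        have hjn : j < g.length := List.mem_range.mp hj
        have halow := ha _ (pv_getD_mem a j (lt_of_lt_of_le hjn hlen))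
        have hbeq : (a.getD j ' ' == g.getD i ' ')
            = (pvToIdx (a.getD j ' ') == (g.map pvToIdx).getD i 0) := by
          apply Bool.eq_iff_iff.mpr
          simp only [beq_iff_eq, hk]
          constructor
          · intro h; rw [h]
          · intro h; exact pvToIdx_inj _ _ halow hglow h
        rw [hbeq, Bool.and_comm]
      cases hf : (List.range g.length).find?
          (fun j => !(used.getD j false) && (a.getD j ' ' == g.getD i ' ')) with
      | none =>
        have hnone := List.find?_eq_none.mp hf
        have hcnt0 : (List.range g.length).countP
            (fun j => (pvToIdx (a.getD j ' ') == (g.map pvToIdx).getD i 0) && !(used.getD j false)) = 0 := by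
          apply List.countP_eq_zero.mpr
          intro j hj
          rw [← hpe j hj]
          exact hnone j hj
        have hng : ¬ (cnt.getD ((g.map pvToIdx).getD i 0) 0 > 0) := by
          rw [hinv _, hcnt0]; simp
        rw [if_neg hng]
        exact ih hit _ _ _ _ rfl hc hu hinv
      | some j =>
        have hpBj := List.find?_some hf
        have hjmem := List.mem_of_find?_eq_some hf
        have hjn : j < g.length := List.mem_range.mp hjmem
        have hpkj : ((pvToIdx (a.getD j ' ') == (g.map pvToIdx).getD i 0) && !(used.getD j false)) = true := by
          rw [← hpe j hjmem]; exact hpBj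
        have hused : used.getD j false = false := by
          cases hb : used.getD j false
          · rfl
          · rw [hb] at hpkj; simp at hpkj
        have haj : pvToIdx (a.getD j ' ') = (g.map pvToIdx).getD i 0 := by
          cases hq : (pvToIdx (a.getD j ' ') == (g.map pvToIdx).getD i 0)
          · rw [hq] at hpkj; simp at hpkj
          · exact beq_iff_eq.mp hq
        have hpos : 0 < (List.range g.length).countP
            (fun j => (pvToIdx (a.getD j ' ') == (g.map pvToIdx).getD i 0) && !(used.getD j false)) :=
          List.countP_pos_iff.mpr ⟨j, hjmem, hpkj⟩
        have hgt : cnt.getD ((g.map pvToIdx).getD i 0) 0 > 0 := by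
          rw [hinv _]; exact_mod_cast hpos
        rw [if_pos hgt]
        apply ih hit
        · rfl
        · simp [hc]
        · simp [hu]
        · intro k'
          by_cases hkk : k' = (g.map pvToIdx).getD i 0
          · rw [hkk, pv_getD_set_eq _ _ _ _ (by omega), hinv _]
            have hdrop := pv_countP_drop (List.range g.length)
              (fun x => (pvToIdx (a.getD x ' ') == (g.map pvToIdx).getD i 0) && !(used.getD x false))
              (fun x => (pvToIdx (a.getD x ' ') == (g.map pvToIdx).getD i 0) && !((used.set j true).getD x false))
              j (List.nodup_range) hjmem hpkj
              (by simp only [pv_getD_set_eq _ _ _ _ (show j < used.length by omega)]; simp)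
              (by
                intro x hx hxj
                simp only [pv_getD_set_ne _ _ _ _ _ (fun e => hxj e.symm)])
            push_cast at hdrop ⊢
            omega
          · rw [pv_getD_set_ne _ _ _ _ _ (fun e => hkk e.symm), hinv k']
            have hcongr : List.countP
                  (fun x => (pvToIdx (a.getD x ' ') == k') && !(used.getD x false)) (List.range g.length)
                = List.countP
                  (fun x => (pvToIdx (a.getD x ' ') == k') && !((used.set j true).getD x false)) (List.range g.length) := by
              apply List.countP_congr
              intro x hx
              by_cases hxj : x = j
              · subst hxj
                simp only [hused, pv_getD_set_eq _ _ _ _ (show x < used.length by omega)]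
                simp only [Bool.not_false, Bool.not_true, Bool.and_true, Bool.and_false]
                simp only [beq_iff_eq]
                constructor
                · intro e
                  exact absurd (e.symm.trans haj) hkk
                · intro e
                  exact absurd e (by simp)
              · simp only [pv_getD_set_ne _ _ _ _ _ (fun e => hxj e.symm)]
            rw [hcongr]
    · rw [if_neg h0, if_neg h0]
      exact ih hit _ _ _ _ rfl hc hu hinv


lemma pv_digits_eq (g a : List Char) (hlen : g.length ≤ a.length)
    (hg : ∀ c ∈ g, 97 ≤ c.toNat ∧ c.toNat ≤ 122)
    (ha : ∀ c ∈ a, 97 ≤ c.toNat ∧ c.toNat ≤ 122) :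
    (pvYellowA (g.map pvToIdx) (List.range g.length)
        (pvGreenA g a (g.map pvToIdx) (List.range g.length)
          (List.replicate g.length 0, pvCountsA (a.map pvToIdx) (List.range g.length)))).1
      = (pvYellowB g a (List.range g.length) (List.range g.length)
        (pvGreenB g a (List.range g.length)
          (List.replicate g.length 0, List.replicate g.length false))).1 := by
  have hbA : ∀ i ∈ List.range g.length, (a.map pvToIdx).getD i 0 < 26 := by
    intro i hi
    have hin : i < g.length := List.mem_range.mp hi
    rw [pv_getD_map a i (lt_of_lt_of_le hin hlen)]
    exact pvToIdx_lt _ (ha _ (pv_getD_mem a i (lt_of_lt_of_le hin hlen)))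
  have hbG : ∀ i ∈ List.range g.length, (g.map pvToIdx).getD i 0 < 26 := by
    intro i hi
    have hin : i < g.length := List.mem_range.mp hi
    rw [pv_getD_map g i hin]
    exact pvToIdx_lt _ (hg _ (pv_getD_mem g i hin))
  obtain ⟨hcl, hck⟩ := pv_countsA_spec (a.map pvToIdx) (List.range g.length)
    (List.replicate 26 0) (by simp) hbA
  have hcl' : (pvCountsA (a.map pvToIdx) (List.range g.length)).length = 26 := hcl
  have hck' : ∀ k, (pvCountsA (a.map pvToIdx) (List.range g.length)).getD k 0
      = (List.replicate 26 (0:ℤ)).getD k 0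
        + ((List.range g.length).countP (fun i => (a.map pvToIdx).getD i 0 == k) : ℤ) := hck
  obtain ⟨hgl, hgk⟩ := pv_greenA_cnt g a (g.map pvToIdx) (List.range g.length)
    (List.replicate g.length 0, pvCountsA (a.map pvToIdx) (List.range g.length)) hcl' hbG
  obtain ⟨hul, huk⟩ := pv_greenB_used g a (List.range g.length)
    (List.replicate g.length 0, List.replicate g.length false)
    (by intro i hi; simpa using List.mem_range.mp hi)
  have hinv : ∀ k, (pvGreenA g a (g.map pvToIdx) (List.range g.length)
      (List.replicate g.length 0, pvCountsA (a.map pvToIdx) (List.range g.length))).2.getD k 0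
      = ((List.range g.length).countP (fun j => (pvToIdx (a.getD j ' ') == k)
          && !((pvGreenB g a (List.range g.length)
            (List.replicate g.length 0, List.replicate g.length false)).2.getD j false)) : ℤ) := by
    intro k
    rw [hgk k, hck' k]
    have c1 : (List.range g.length).countP (fun j => (a.map pvToIdx).getD j 0 == k)
        = (List.range g.length).countP (fun j => pvToIdx (a.getD j ' ') == k) := by
      apply List.countP_congr
      intro j hj
      rw [pv_getD_map a j (lt_of_lt_of_le (List.mem_range.mp hj) hlen)]
    have c2 : (List.range g.length).countP
          (fun j => decide (g.getD j ' ' = a.getD j ' ') && ((g.map pvToIdx).getD j 0 == k))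
        = (List.range g.length).countP
          (fun j => (pvToIdx (a.getD j ' ') == k) && decide (g.getD j ' ' = a.getD j ' ')) := by
      apply List.countP_congr
      intro j hj
      have hjn : j < g.length := List.mem_range.mp hj
      by_cases hm : g.getD j ' ' = a.getD j ' '
      · rw [decide_eq_true hm, pv_getD_map g j hjn, hm]
        simp [Bool.and_comm]
      · rw [decide_eq_false hm]
        simp
    have c3 := pv_countP_split (List.range g.length)
      (fun j => pvToIdx (a.getD j ' ') == k)
      (fun j => decide (g.getD j ' ' = a.getD j ' '))
    have c4 : (List.range g.length).countP
          (fun j => (pvToIdx (a.getD j ' ') == k)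
            && !((pvGreenB g a (List.range g.length)
              (List.replicate g.length 0, List.replicate g.length false)).2.getD j false))
        = (List.range g.length).countP
          (fun j => (pvToIdx (a.getD j ' ') == k) && !(decide (g.getD j ' ' = a.getD j ' '))) := by
      apply List.countP_congr
      intro j hj
      rw [huk j, decide_eq_true hj]
      simp
    rw [c1, c2, c4]
    have hrep : (List.replicate 26 (0:ℤ)).getD k 0 = 0 := by
      by_cases hk : k < 26
      · rw [List.getD_eq_getElem?_getD, List.getElem?_replicate, if_pos hk]; rfl
      · rw [List.getD_eq_getElem?_getD, List.getElem?_replicate, if_neg hk]; rfl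
    rw [hrep]
    push_cast
    omega
  exact pv_yellow_eq g a hlen hg ha (List.range g.length) (fun i hi => List.mem_range.mp hi)
    _ _ _ _
    (pv_green_fst g a (g.map pvToIdx) (List.range g.length) _ _ rfl)
    hgl (by simpa using hul) hinv

-- ===== VERDICT (by name: the statement is the Claim_ definition above) =====
theorem old_get_feedback_spec : Claim_equal_old_get_feedback := by
  intro guess answer _ hpre
  obtain ⟨hlen, hg, ha⟩ := hpre
  rw [List.all_eq_true] at hg ha
  simp only [pvLower, Bool.and_eq_true, decide_eq_true_eq] at hg ha
  unfold Spec_old_get_feedback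
  simp only [old_get_feedback, old_get_feedback_alt]
  rw [pv_digits_eq guess.toList answer.toList hlen hg ha]
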